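-- pv_equiv track=rewrite | github.com/Et3rnalph0en1x/CScode | prelab07-Q2.py | substitutePairs
-- ===== SOURCE A (Python) =====
-- def substitutePairs(myString, pairsList):
--
--     letters = list(myString)
--
--     for i in range(len(letters)):
--
--            for j in range(len(pairsList)):
--
--                if letters[i] == pairsList[j][0]:
--
--                    letters[i] = pairsList[j][1]
--
--     finalWord = ''.join(map(str, letters))
--
--     return finalWord
-- ===== SOURCE B (Python) =====
-- def substitutePairs(myString, pairsList):
--     # Precompose the substitution chain over the pairs (right to left):
--     # after processing a reversed prefix, final[s] is the result of running
--     # the remaining (suffix) pairs on s; prepending (a, b) makes a map to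
--     # what b maps to. One dict lookup per character then suffices.
--     final = {}
--     for a, b in reversed(pairsList):
--         final[a] = final.get(b, b)
--     return ''.join(final.get(ch, ch) for ch in myString)
-- ===== Notes on version B (the rewrite author's own statement) =====
-- stated objective: faster
-- what changed: B precomposes the whole chain of substitutions into one dict by folding the pairs list in reverse (final[a] = final.get(b, b)), then maps each character through a single lookup, instead of scanning the pairs list for every character position.
import Mathlib
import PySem

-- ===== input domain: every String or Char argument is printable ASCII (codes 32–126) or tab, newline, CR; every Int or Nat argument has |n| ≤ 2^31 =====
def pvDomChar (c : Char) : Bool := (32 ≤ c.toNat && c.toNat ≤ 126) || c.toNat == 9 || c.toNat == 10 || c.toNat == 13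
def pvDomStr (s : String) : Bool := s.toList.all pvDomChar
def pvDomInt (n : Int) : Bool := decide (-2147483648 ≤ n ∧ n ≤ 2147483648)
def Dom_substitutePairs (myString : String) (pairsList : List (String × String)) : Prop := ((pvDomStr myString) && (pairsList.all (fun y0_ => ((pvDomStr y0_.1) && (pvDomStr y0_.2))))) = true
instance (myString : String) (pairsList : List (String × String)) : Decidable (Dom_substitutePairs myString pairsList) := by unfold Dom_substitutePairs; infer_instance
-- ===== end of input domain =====

-- B precomposes the substitution chain into one dict over the pairs (folded in reverse), then one lookup per character (faster, asymptotic).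


-- ===== PORT A =====
-- letters = list(myString); for each position, scan all pairs chaining replacements; join.
def substitutePairs (myString : String) (pairsList : List (String × String)) : String :=
  String.join ((myString.toList.map (fun c => String.mk [c])).map (fun s =>
    pairsList.foldl (fun s p => if s = p.1 then p.2 else s) s))

-- ===== PORT B =====
-- fold the pairs in reverse building the composed map final[a] = final.get(b, b);
-- then each character needs a single lookup final.get(ch, ch).
def substitutePairs_alt (myString : String) (pairsList : List (String × String)) : String :=
  let final := pairsList.reverse.foldl
    (fun (d : PySem.Dict String String) p => d.insert p.1 (d.getD p.2 p.2))
    PySem.Dict.empty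
  String.join (myString.toList.map (fun ch =>
    final.getD (String.mk [ch]) (String.mk [ch])))

-- ===== PRECONDITION & SPEC =====
def Spec_substitutePairs (myString : String) (pairsList : List (String × String)) (out : String) : Prop := out = substitutePairs_alt myString pairsList
instance (myString : String) (pairsList : List (String × String)) (out : String) : Decidable (Spec_substitutePairs myString pairsList out) := by unfold Spec_substitutePairs; infer_instance

-- ===== CLAIM (what is proved, stated in full; the proofs are below) =====
def Claim_equal_substitutePairs : Prop := ∀ (myString : String) (pairsList : List (String × String)), Dom_substitutePairs myString pairsList → Spec_substitutePairs myString pairsList (substitutePairs myString pairsList)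

-- ===== LEMMAS AND PROOFS =====

-- the chained substitution of one element through the pairs list (A's inner scan)
def pvChain (pairsList : List (String × String)) (s : String) : String :=
  pairsList.foldl (fun s p => if s = p.1 then p.2 else s) s

-- B's composed dict
def pvFinal (pairsList : List (String × String)) : PySem.Dict String String :=
  pairsList.reverse.foldl
    (fun (d : PySem.Dict String String) p => d.insert p.1 (d.getD p.2 p.2))
    PySem.Dict.empty

theorem pvFinal_cons (p : String × String) (rest : List (String × String)) :
    pvFinal (p :: rest)
      = (pvFinal rest).insert p.1 ((pvFinal rest).getD p.2 p.2) := by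
  simp [pvFinal, List.foldl_append]

-- key lemma: looking up s (default s) in the composed dict IS the chained substitution
theorem pvFinal_getD (pairsList : List (String × String)) (s : String) :
    (pvFinal pairsList).getD s s = pvChain pairsList s := by
  induction pairsList generalizing s with
  | nil => simp [pvFinal, pvChain, PySem.Dict.getD_eq_get?_getD, PySem.Dict.get?_empty]
  | cons p rest ih =>
    rw [pvFinal_cons]
    have hchain : pvChain (p :: rest) s = pvChain rest (if s = p.1 then p.2 else s) := rfl
    rw [hchain]
    by_cases h : s = p.1
    · subst h
      rw [PySem.Dict.getD_eq_get?_getD, PySem.Dict.get?_insert_self, Option.getD_some,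
        if_pos rfl]
      exact ih p.2
    · rw [PySem.Dict.getD_eq_get?_getD, PySem.Dict.get?_insert, if_neg h, if_neg h,
        ← PySem.Dict.getD_eq_get?_getD]
      exact ih s

-- ===== VERDICT (by name: the statement is the Claim_ definition above) =====
theorem substitutePairs_spec : Claim_equal_substitutePairs := by
  intro myString pairsList _
  unfold Spec_substitutePairs substitutePairs substitutePairs_alt
  simp only [List.map_map]
  congr 1
  apply List.map_congr_left
  intro ch _
  show pvChain pairsList (String.mk [ch]) = (pvFinal pairsList).getD (String.mk [ch]) (String.mk [ch])
  rw [pvFinal_getD]
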